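-- pv_equiv track=rewrite | github.com/AnnaGrBio/DESWOMAN | module_transcripts_data_and_threeshold.py | assessTE
-- ===== SOURCE A (Python) =====
-- def assessTE(fasta_file):
--     presenceTE = False
--     list_nucl = ["a", "t", "c", "g", "n"]
--     for nucl in list_nucl:
--         if nucl in fasta_file:
--             presenceTE = True
--             break
--     return presenceTE
-- ===== SOURCE B (Python) =====
-- def assessTE(fasta_file):
--     nucl_set = {"a", "t", "c", "g", "n"}
--     for char in fasta_file:
--         if char in nucl_set:
--             return True
--     return False
-- ===== Notes on version B (the rewrite author's own statement) =====
-- stated objective: idiomatic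
-- what changed: B scans the input string once with an early return on set membership, instead of running a substring search over the whole input for each of the five nucleotide characters.
import Mathlib
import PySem

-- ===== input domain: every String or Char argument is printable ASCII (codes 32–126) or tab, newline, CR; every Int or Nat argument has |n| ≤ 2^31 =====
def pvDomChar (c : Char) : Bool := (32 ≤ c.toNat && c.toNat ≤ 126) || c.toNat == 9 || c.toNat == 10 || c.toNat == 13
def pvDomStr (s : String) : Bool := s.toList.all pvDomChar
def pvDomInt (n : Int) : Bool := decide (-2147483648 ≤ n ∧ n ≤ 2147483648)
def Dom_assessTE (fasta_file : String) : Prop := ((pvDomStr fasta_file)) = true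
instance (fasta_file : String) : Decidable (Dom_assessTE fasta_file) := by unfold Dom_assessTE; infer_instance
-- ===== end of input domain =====

-- B scans the input once with a nucleotide set instead of a per-nucleotide substring search (idiomatic; return value only).
-- ===== PORT A =====
-- for nucl in list_nucl: if nucl in fasta_file: presenceTE = True; break
def assessTE_loop (fasta_file : String) : List String → Bool → Bool
  | [], presenceTE => presenceTE
  | nucl :: rest, presenceTE =>
    if PySem.Str.isIn nucl fasta_file then true
    else assessTE_loop fasta_file rest presenceTE

def assessTE (fasta_file : String) : Bool :=
  assessTE_loop fasta_file ["a", "t", "c", "g", "n"] false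

-- ===== PORT B =====
-- B: one pass over the input's characters, early True on set membership
def assessTE_alt_loop (nuclSet : PySem.Set Char) : List Char → Bool
  | [] => false
  | c :: rest =>
    if PySem.Set.contains nuclSet c then true
    else assessTE_alt_loop nuclSet rest

def assessTE_alt (fasta_file : String) : Bool :=
  assessTE_alt_loop (PySem.Set.ofList ['a', 't', 'c', 'g', 'n']) fasta_file.toList

-- ===== PRECONDITION & SPEC =====
def Spec_assessTE (fasta_file : String) (out : Bool) : Prop := out = assessTE_alt fasta_file
instance (fasta_file : String) (out : Bool) : Decidable (Spec_assessTE fasta_file out) := by unfold Spec_assessTE; infer_instance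

-- ===== CLAIM (what is proved, stated in full; the proofs are below) =====
def Claim_equal_assessTE : Prop := ∀ (fasta_file : String), Dom_assessTE fasta_file → Spec_assessTE fasta_file (assessTE fasta_file)

-- ===== LEMMAS AND PROOFS =====

-- ===== VERDICT (by name: the statement is the Claim_ definition above) =====
-- [a] is an infix of l iff a is a member of l
theorem singleton_infix_iff (a : Char) (l : List Char) : [a] <:+: l ↔ a ∈ l := by
  constructor
  · rintro ⟨s, t, rfl⟩; simp
  · intro h
    rcases List.mem_iff_append.mp h with ⟨s, t, rfl⟩
    exact ⟨s, t, by simp⟩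

-- 'nucl in fasta_file' for a single-character nucl is character membership
theorem isIn_char (a : Char) (nucl : String) (s : String) (hn : nucl.toList = [a]) :
    PySem.Str.isIn nucl s = s.toList.contains a := by
  rw [Bool.eq_iff_iff, PySem.Str.isIn_iff_infix, hn, singleton_infix_iff,
      List.contains_eq_mem, decide_eq_true_iff]

theorem alt_loop_eq (nuclSet : PySem.Set Char) (l : List Char) :
    assessTE_alt_loop nuclSet l = l.any (fun c => PySem.Set.contains nuclSet c) := by
  induction l with
  | nil => rfl
  | cons c rest ih =>
    rw [List.any_cons, ← ih]
    by_cases h : PySem.Set.contains nuclSet c = true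
    · simp [assessTE_alt_loop, h]
    · rw [Bool.not_eq_true] at h
      simp only [assessTE_alt_loop, h, Bool.false_eq_true, if_false, Bool.false_or]

theorem assessTE_spec : Claim_equal_assessTE := by
  intro s _
  unfold Spec_assessTE assessTE assessTE_alt
  rw [alt_loop_eq]
  simp only [assessTE_loop]
  rw [isIn_char 'a' "a" s (by decide), isIn_char 't' "t" s (by decide),
      isIn_char 'c' "c" s (by decide), isIn_char 'g' "g" s (by decide),
      isIn_char 'n' "n" s (by decide)]
  rw [Bool.eq_iff_iff]
  simp only [List.any_eq_true, PySem.Set.contains_iff, PySem.Set.mem_ofList,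
    List.contains_eq_mem, decide_eq_true_iff]
  constructor
  · intro h
    split_ifs at h with h1 h2 h3 h4 h5
    · exact ⟨'a', h1, by decide⟩
    · exact ⟨'t', h2, by decide⟩
    · exact ⟨'c', h3, by decide⟩
    · exact ⟨'g', h4, by decide⟩
    · exact ⟨'n', h5, by decide⟩
  · rintro ⟨c, hc, hmem⟩
    have : c = 'a' ∨ c = 't' ∨ c = 'c' ∨ c = 'g' ∨ c = 'n' := by
      simpa using hmem
    split_ifs with h1 h2 h3 h4 h5
    · rfl
    · rfl
    · rfl
    · rfl
    · rfl
    · rcases this with rfl | rfl | rfl | rfl | rfl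
      · exact absurd hc h1
      · exact absurd hc h2
      · exact absurd hc h3
      · exact absurd hc h4
      · exact absurd hc h5
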